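-- pv_equiv track=rewrite | github.com/mlin9/practice | arrays.py | solution
-- ===== SOURCE A (Python) =====
-- def solution(A):
--     result = 0
--     freq = []
--     for number in A:
--         if number not in freq:
--             result = result + number
--             freq.append(number)
--         else:
--             result = result - number
--             freq.remove(number)
--     return result
--     pass
-- ===== SOURCE B (Python) =====
-- def solution(A):
--     counts = {}
--     for v in A:
--         counts[v] = counts.get(v, 0) + 1
--     return sum(v for v, c in counts.items() if c % 2 == 1)
-- ===== Notes on version B (the rewrite author's own statement) =====
-- stated objective: faster
-- what changed: Replaces the order-dependent toggle loop (add on first sight, subtract and remove on repeat, with linear membership scans over a presence list) by building a frequency dict in one pass and summing the values with odd count.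
import Mathlib
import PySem

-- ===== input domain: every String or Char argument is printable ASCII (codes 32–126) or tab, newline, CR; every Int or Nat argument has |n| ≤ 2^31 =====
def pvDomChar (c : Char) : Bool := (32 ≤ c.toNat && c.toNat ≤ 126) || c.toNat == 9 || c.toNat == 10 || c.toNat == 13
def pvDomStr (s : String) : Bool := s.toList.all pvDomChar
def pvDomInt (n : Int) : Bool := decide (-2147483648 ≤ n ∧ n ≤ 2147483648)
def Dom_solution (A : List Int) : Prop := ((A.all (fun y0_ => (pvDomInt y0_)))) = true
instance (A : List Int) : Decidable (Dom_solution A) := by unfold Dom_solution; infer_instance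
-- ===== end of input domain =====

-- B replaces A's toggle loop (presence list, add/subtract) with a frequency dict built once,
-- then summing the values with odd count; return values agree exactly over integers.

-- ===== PORT A =====
-- A's loop state is (result, freq); 'number in freq' is a membership test,
-- 'freq.remove(number)' removes the first occurrence. remove? is some here because the
-- branch is only taken when number ∈ freq, so the getD default is never used.
def solution (A : List Int) : Int :=
  (A.foldl
    (fun (st : Int × List Int) number =>
      if st.2.contains number = false then
        (st.1 + number, st.2 ++ [number])
      else
        (st.1 - number, (PySem.List.remove? st.2 number).getD st.2))
    (0, [])).1

-- ===== PORT B =====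
def solution_alt (A : List Int) : Int :=
  (A.foldl (fun d v => d.insert v (d.getD v 0 + 1))
      (PySem.Dict.empty : PySem.Dict Int Int)).items.foldl
    (fun acc p => if PySem.Int.mod p.2 2 == 1 then acc + p.1 else acc) 0

-- ===== PRECONDITION & SPEC =====
def Spec_solution (A : List Int) (out : Int) : Prop := out = solution_alt A
instance (A : List Int) (out : Int) : Decidable (Spec_solution A out) := by unfold Spec_solution; infer_instance

-- ===== CLAIM (what is proved, stated in full; the proofs are below) =====
def Claim_equal_solution : Prop := ∀ (A : List Int), Dom_solution A → Spec_solution A (solution A)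

-- ===== LEMMAS AND PROOFS =====

-- The freq list A maintains, as a standalone toggle fold.
def togg (f : List Int) : List Int → List Int
  | [] => f
  | v :: t =>
      if f.contains v = false then togg (f ++ [v]) t
      else togg ((PySem.List.remove? f v).getD f) t

theorem togg_nil (f : List Int) : togg f [] = f := rfl

theorem togg_cons (f : List Int) (v : Int) (t : List Int) :
    togg f (v :: t) =
      if f.contains v = false then togg (f ++ [v]) t
      else togg ((PySem.List.remove? f v).getD f) t := rfl

-- A's loop computes r + (sum of final freq) - (sum of initial freq).
theorem loopA_sum (t : List Int) (r : Int) (f : List Int) :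
    (t.foldl
      (fun (st : Int × List Int) number =>
        if st.2.contains number = false then
          (st.1 + number, st.2 ++ [number])
        else
          (st.1 - number, (PySem.List.remove? st.2 number).getD st.2))
      (r, f)).1 = r + (togg f t).sum - f.sum := by
  induction t generalizing r f with
  | nil => simp [togg_nil]
  | cons v t ih =>
    by_cases h : f.contains v = false
    · simp only [List.foldl_cons, h, togg_cons, if_true]
      rw [ih]
      simp
      ring
    · have hv : v ∈ f := by
        simpa using (Bool.not_eq_false _).mp h
      have hrem : PySem.List.remove? f v = some (f.erase v) :=
        PySem.List.remove?_eq_some_erase f v hv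
      simp only [List.foldl_cons, togg_cons, if_neg h, hrem, Option.getD_some]
      rw [ih]
      have hperm : List.Perm f (v :: f.erase v) := List.perm_cons_erase hv
      have hsum : f.sum = v + (f.erase v).sum := by
        simpa using hperm.sum_eq
      linarith

-- The toggle list is duplicate-free and contains exactly the values whose
-- count (in the remaining input, plus the parity contributed by f) is odd.
theorem togg_spec (t : List Int) (f : List Int) (hf : f.Nodup) :
    (togg f t).Nodup ∧
      ∀ v : Int, v ∈ togg f t ↔ (t.count v + (if v ∈ f then 1 else 0)) % 2 = 1 := by
  induction t generalizing f with
  | nil =>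
    refine ⟨hf, fun v => ?_⟩
    by_cases hv : v ∈ f <;> simp [togg_nil, hv]
  | cons x t ih =>
    by_cases h : f.contains x = false
    · have hx : x ∉ f := by simpa using h
      have hf' : (f ++ [x]).Nodup := by
        simp [List.nodup_append, hf]
        exact fun a ha e => hx (e ▸ ha)
      rcases ih (f ++ [x]) hf' with ⟨hn, hm⟩
      rw [togg_cons, if_pos h]
      refine ⟨hn, fun v => ?_⟩
      rw [hm v]
      by_cases hvx : v = x
      · subst hvx
        simp [hx, List.mem_append]
      · have hxv : ¬ x = v := fun e => hvx e.symm
        simp [hxv, hvx, List.mem_append]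
    · have hx : x ∈ f := by simpa using (Bool.not_eq_false _).mp h
      have hrem : PySem.List.remove? f x = some (f.erase x) :=
        PySem.List.remove?_eq_some_erase f x hx
      have hf' : (f.erase x).Nodup := hf.erase x
      rcases ih (f.erase x) hf' with ⟨hn, hm⟩
      rw [togg_cons, if_neg h, hrem, Option.getD_some]
      refine ⟨hn, fun v => ?_⟩
      rw [hm v]
      by_cases hvx : v = x
      · subst hvx
        have hne : v ∉ f.erase v := fun hc => (List.Nodup.mem_erase_iff hf |>.mp hc).1 rfl
        simp [hx, hne]
        omega
      · have hiff : v ∈ f.erase x ↔ v ∈ f := by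
          rw [List.Nodup.mem_erase_iff hf]
          exact ⟨fun h => h.2, fun h => ⟨hvx, h⟩⟩
        have hxv : ¬ x = v := fun e => hvx e.symm
        simp [hxv, hiff]

-- B's final fold is the sum of the first components whose second passes the test.
theorem foldl_if_add (p : Int × Int → Bool) (l : List (Int × Int)) (a : Int) :
    l.foldl (fun acc q => if p q then acc + q.1 else acc) a
      = a + ((l.filter p).map Prod.fst).sum := by
  induction l generalizing a with
  | nil => simp
  | cons q l ih =>
    by_cases h : p q
    · simp [h, ih]; ring
    · simp [h, ih]

theorem solution_alt_eq (A : List Int) :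
    solution_alt A
      = (((PySem.List.dedup A).filter
            (fun v => PySem.Int.mod (A.count v : Int) 2 == 1)).map id).sum := by
  unfold solution_alt
  rw [PySem.Dict.foldl_insert_getD_add_one_eq_counter, PySem.Dict.items_counter,
    foldl_if_add]
  rw [← PySem.List.dedup_eq_ofList]
  rw [List.filter_map, List.map_map]
  simp [Function.comp_def]

theorem solution_spec' (A : List Int) : solution A = solution_alt A := by
  have hA : solution A = (togg [] A).sum := by
    unfold solution
    rw [loopA_sum]
    simp
  rcases togg_spec A [] List.nodup_nil with ⟨hn, hm⟩
  rw [solution_alt_eq, hA]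
  apply List.Perm.sum_eq
  have hBn : (((PySem.List.dedup A).filter
      (fun v => PySem.Int.mod (A.count v : Int) 2 == 1)).map id).Nodup := by
    simpa using (PySem.List.nodup_dedup A).filter _
  rw [List.perm_ext_iff_of_nodup hn hBn]
  intro v
  have hmod : PySem.Int.mod (A.count v : Int) 2 = ((A.count v % 2 : Nat) : Int) :=
    PySem.Int.mod_natCast _ _
  have hpred : ((PySem.Int.mod (A.count v : Int) 2 == 1) = true) ↔ A.count v % 2 = 1 := by
    rw [hmod]
    constructor
    · intro hc
      have := of_decide_eq_true (by simpa using hc)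
      exact_mod_cast this
    · intro hc
      simp [hc]
  rw [hm v]
  simp only [List.mem_map, List.mem_filter, id] at *
  constructor
  · intro hv
    simp at hv
    have hmem : v ∈ A := by
      have : A.count v ≠ 0 := by omega
      exact List.count_pos_iff.mp (Nat.pos_of_ne_zero this)
    exact ⟨v, ⟨(PySem.List.mem_dedup A v).mpr hmem, hpred.mpr hv⟩, rfl⟩
  · rintro ⟨w, ⟨_, hc⟩, rfl⟩
    have := hpred.mp hc
    simpa using this

-- ===== VERDICT (by name: the statement is the Claim_ definition above) =====
theorem solution_spec : Claim_equal_solution := by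
  intro A _
  unfold Spec_solution
  exact solution_spec' A
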